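-- pv_equiv track=rewrite | github.com/Wos2610/Python | kiemtrahecoso5.py | check
-- ===== SOURCE A (Python) =====
-- def check(s):
--     sum = 0
--     for i in range(len(s)):
--         if s[i] != '0' and s[i] != '1' and s[i] != '2' and s[i] != '3' and s[i] != '5':
--             return False
--         sum += ord(s[i]) - ord('0')
--     if sum == 5: return True
--     return False
-- ===== SOURCE B (Python) =====
-- def check(s):
--     counts = {}
--     for ch in s:
--         counts[ch] = counts.get(ch, 0) + 1
--     if not set(counts) <= {'0', '1', '2', '3', '5'}:
--         return False
--     return sum((ord(d) - ord('0')) * n for d, n in counts.items()) == 5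
-- ===== Notes on version B (the rewrite author's own statement) =====
-- stated objective: alternative
-- what changed: B replaces A's fused per-position check-and-accumulate loop with early return by a frequency-table pass: it counts characters into a dict, validates that the distinct keys are a subset of {'0','1','2','3','5'}, and compares a multiplicity-weighted digit sum over the distinct keys with 5.
import Mathlib
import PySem

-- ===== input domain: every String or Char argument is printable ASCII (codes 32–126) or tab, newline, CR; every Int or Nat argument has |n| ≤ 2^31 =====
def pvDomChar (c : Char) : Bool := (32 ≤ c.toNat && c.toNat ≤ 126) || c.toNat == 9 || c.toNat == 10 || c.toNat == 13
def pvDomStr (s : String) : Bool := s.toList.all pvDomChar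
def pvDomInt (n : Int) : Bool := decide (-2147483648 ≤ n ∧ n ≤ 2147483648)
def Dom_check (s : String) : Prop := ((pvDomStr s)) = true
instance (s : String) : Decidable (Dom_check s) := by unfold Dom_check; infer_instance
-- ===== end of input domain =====

-- B builds a character-frequency dict once, then validates the distinct keys and takes a
-- weighted digit sum, instead of A's fused per-position check-and-accumulate loop with
-- early return (objective: alternative decomposition; not faster).

-- ===== PORT A =====
-- the for-loop over range(len(s)) with the running sum and the early 'return False'
def checkLoop : List Char → Int → Bool
  | [], acc => acc == 5
  | c :: rest, acc =>
    if c != '0' && c != '1' && c != '2' && c != '3' && c != '5' then false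
    else checkLoop rest (acc + ((c.toNat : Int) - 48))

def check (s : String) : Bool := checkLoop s.toList 0

-- ===== PORT B =====
def check_alt (s : String) : Bool :=
  -- counts[ch] = counts.get(ch, 0) + 1 over the string
  let counts := s.toList.foldl (fun d c => d.insert c (d.getD c 0 + 1)) PySem.Dict.empty
  -- if not set(counts) <= {'0','1','2','3','5'}: return False
  if !(counts.keys.all (fun c => decide (c ∈ (['0', '1', '2', '3', '5'] : List Char)))) then
    false
  else
    -- sum((ord(d) - ord('0')) * n for d, n in counts.items()) == 5
    (counts.items.map (fun p => ((p.1.toNat : Int) - 48) * p.2)).sum == 5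

-- ===== PRECONDITION & SPEC =====
def Spec_check (s : String) (out : Bool) : Prop := out = check_alt s
instance (s : String) (out : Bool) : Decidable (Spec_check s out) := by unfold Spec_check; infer_instance

-- ===== CLAIM (what is proved, stated in full; the proofs are below) =====
def Claim_equal_check : Prop := ∀ (s : String), Dom_check s → Spec_check s (check s)

-- ===== LEMMAS AND PROOFS =====

-- digit weight used by both programs
def pvW (c : Char) : Int := (c.toNat : Int) - 48

-- A's fused loop = validity of every character && (acc + plain weighted sum == 5)
theorem checkLoop_eq (l : List Char) : ∀ acc : Int,
    checkLoop l acc =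
      if l.all (fun c => decide (c ∈ (['0', '1', '2', '3', '5'] : List Char))) then
        decide (acc + (l.map pvW).sum = 5)
      else false := by
  induction l with
  | nil => intro acc; simp only [checkLoop, List.all_nil, if_true, List.map_nil, List.sum_nil, add_zero, Bool.beq_eq_decide_eq]
  | cons c rest ih =>
    intro acc
    by_cases hc : c ∈ (['0', '1', '2', '3', '5'] : List Char)
    · have hb : (c != '0' && c != '1' && c != '2' && c != '3' && c != '5') = false := by
        fin_cases hc <;> decide
      simp only [checkLoop, hb, Bool.false_eq_true, if_false, ih, List.all_cons, hc,
        decide_true, Bool.true_and, List.map_cons, List.sum_cons, pvW]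
      ring_nf
    · have hb : (c != '0' && c != '1' && c != '2' && c != '3' && c != '5') = true := by
        simp only [List.mem_cons, not_or] at hc
        obtain ⟨h0, h1, h2, h3, h5⟩ := hc
        simp [bne_iff_ne, h0, h1, h2, h3, h5]
      have hm : decide (c ∈ (['0', '1', '2', '3', '5'] : List Char)) = false := by
        simpa using hc
      simp only [checkLoop, hb, if_true, List.all_cons, hm, Bool.false_and,
        Bool.false_eq_true, if_false]

-- the weighted sum over distinct characters with multiplicities = the plain sum over the string
theorem weighted_sum_eq (l : List Char) :
    ((PySem.Set.ofList l).map (fun k => pvW k * (l.count k : Int))).sum = (l.map pvW).sum := by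
  rw [Finset.sum_list_map_count l pvW]
  rw [← List.sum_toFinset (fun k => pvW k * (l.count k : Int)) (PySem.Set.nodup_ofList l)]
  rw [show (PySem.Set.ofList l).toFinset = l.toFinset by
    apply Finset.ext; intro a; simp [List.mem_toFinset, PySem.Set.mem_ofList]]
  apply Finset.sum_congr rfl
  intro x _
  simp [mul_comm]

-- the subset test over the distinct keys = the all-characters test
theorem keys_all_eq (l : List Char) (p : Char → Bool) :
    (PySem.Set.ofList l).all p = l.all p := by
  rcases h : (PySem.Set.ofList l).all p with _ | _ <;>
    rcases h' : l.all p with _ | _ <;> try rfl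
  · rw [List.all_eq_true] at h'
    rw [Bool.eq_false_iff, ne_eq, List.all_eq_true] at h
    exact absurd (fun x hx => h' x ((PySem.Set.mem_ofList l x).mp hx)) h
  · rw [List.all_eq_true] at h
    rw [Bool.eq_false_iff, ne_eq, List.all_eq_true] at h'
    exact absurd (fun x hx => h x ((PySem.Set.mem_ofList l x).mpr hx)) h'

-- ===== VERDICT (by name: the statement is the Claim_ definition above) =====
theorem check_spec : Claim_equal_check := by
  intro s _
  unfold Spec_check check check_alt
  rw [PySem.Dict.foldl_insert_getD_add_one_eq_counter]
  rw [checkLoop_eq]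
  simp only [PySem.Dict.keys_counter, PySem.Dict.items_counter, keys_all_eq]
  rcases h : s.toList.all (fun c => decide (c ∈ (['0', '1', '2', '3', '5'] : List Char))) with _ | _
  · simp only [Bool.false_eq_true, if_false, Bool.not_false, if_true]
  · simp only [if_true, Bool.not_true, Bool.false_eq_true, if_false, zero_add]
    rw [List.map_map]
    have hfe : ((fun p : Char × Int => ((p.1.toNat : Int) - 48) * p.2) ∘
        fun k => (k, (s.toList.count k : Int))) = fun k => pvW k * (s.toList.count k : Int) := by
      funext k; simp [pvW]
    rw [hfe, weighted_sum_eq, Bool.beq_eq_decide_eq]
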